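-- pv_equiv track=rewrite | github.com/SamarthInc/ResumeWorld | analysis/scripts/keyWordScorer.py | getGrams
-- ===== SOURCE A (Python) =====
-- def getGrams(text):
--     monograms = []
--     bigram = []
--     trigram = []
--     split_text = text.split(" ")
--     for i in range(len(split_text)):
--         if i <= (len(split_text) - 3):
--             fw = split_text[i]
--             sw = split_text[i+1]
--             tw = split_text[i+2]
--             monograms.append(fw)
--             bigram.append(fw + " " + sw)
--             trigram.append(fw + " " + sw + " " + tw)
--         elif i <= (len(split_text) - 2):
--             fw = split_text[i]
--             sw = split_text[i+1]
--             monograms.append(fw)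
--             bigram.append(fw + " " + sw)
--         elif i == (len(split_text)-1):
--             fw = split_text[i]
--             monograms.append(fw)
--     op = {"monogram":monograms,"bigram":bigram,"trigram":trigram}
--     return op
-- ===== SOURCE B (Python) =====
-- def getGrams(text):
--     split_text = text.split(" ")
--     return {
--         "monogram": split_text,
--         "bigram": [a + " " + b for a, b in zip(split_text, split_text[1:])],
--         "trigram": [a + " " + b + " " + c for a, b, c in zip(split_text, split_text[1:], split_text[2:])],
--     }
-- ===== Notes on version B (the rewrite author's own statement) =====
-- stated objective: idiomatic
-- what changed: The single index loop with three if/elif boundary branches is replaced by three independent passes: monograms are the split list itself, bigrams and trigrams are comprehensions over zip of the list with its shifted tails, zip truncation handling the boundaries.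
import Mathlib
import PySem

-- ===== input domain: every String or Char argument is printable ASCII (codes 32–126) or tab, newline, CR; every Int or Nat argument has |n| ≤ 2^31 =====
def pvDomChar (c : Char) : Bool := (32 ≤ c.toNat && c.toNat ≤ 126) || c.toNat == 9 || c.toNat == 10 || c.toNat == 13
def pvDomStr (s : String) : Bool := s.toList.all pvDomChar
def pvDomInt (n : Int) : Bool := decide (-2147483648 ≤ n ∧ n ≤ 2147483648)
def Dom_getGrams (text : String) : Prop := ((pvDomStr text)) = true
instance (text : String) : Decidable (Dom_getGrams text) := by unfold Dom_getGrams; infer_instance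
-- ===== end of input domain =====

-- B replaces the single index loop with three independent zip-shaped passes (idiomatic decomposition; same cost).


-- ===== PORT A =====
-- the loop body; indices are used only when the branch guard proves them in range, so pyGetD "" is exact
def getGramsStep (ws : List String) (n : Int)
    (acc : List String × List String × List String) (i : Int) :
    List String × List String × List String :=
  let (monograms, bigram, trigram) := acc
  if i ≤ n - 3 then
    let fw := PySem.List.pyGetD ws i ""
    let sw := PySem.List.pyGetD ws (i+1) ""
    let tw := PySem.List.pyGetD ws (i+2) ""
    (monograms ++ [fw], bigram ++ [fw ++ " " ++ sw], trigram ++ [fw ++ " " ++ sw ++ " " ++ tw])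
  else if i ≤ n - 2 then
    let fw := PySem.List.pyGetD ws i ""
    let sw := PySem.List.pyGetD ws (i+1) ""
    (monograms ++ [fw], bigram ++ [fw ++ " " ++ sw], trigram)
  else if i = n - 1 then
    let fw := PySem.List.pyGetD ws i ""
    (monograms ++ [fw], bigram, trigram)
  else acc

def getGrams (text : String) : List (String × List String) :=
  let split_text := (PySem.Str.split? text " ").getD []   -- sep " " ≠ "", so split? is some
  let n : Int := split_text.length
  let st := (PySem.List.pyRange 0 n 1).foldl (getGramsStep split_text n) ([], [], [])
  [("monogram", st.1), ("bigram", st.2.1), ("trigram", st.2.2)]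

-- ===== PORT B =====
def getGrams_alt (text : String) : List (String × List String) :=
  let split_text := (PySem.Str.split? text " ").getD []
  [("monogram", split_text),
   ("bigram", (split_text.zip (PySem.List.slice split_text (some 1) none)).map
      (fun p => p.1 ++ " " ++ p.2)),
   ("trigram", ((split_text.zip (PySem.List.slice split_text (some 1) none)).zip
        (PySem.List.slice split_text (some 2) none)).map
      (fun p => p.1.1 ++ " " ++ p.1.2 ++ " " ++ p.2))]

-- ===== PRECONDITION & SPEC =====
def Spec_getGrams (text : String) (out : List (String × List String)) : Prop := out = getGrams_alt text
instance (text : String) (out : List (String × List String)) : Decidable (Spec_getGrams text out) := by unfold Spec_getGrams; infer_instance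

-- ===== CLAIM (what is proved, stated in full; the proofs are below) =====
def Claim_equal_getGrams : Prop := ∀ (text : String), Dom_getGrams text → Spec_getGrams text (getGrams text)

-- ===== LEMMAS AND PROOFS =====

-- recursive characterisations of the bigram/trigram lists
def biOf : List String → List String
  | x :: y :: rest => (x ++ " " ++ y) :: biOf (y :: rest)
  | _ => []

def triOf : List String → List String
  | x :: y :: z :: rest => (x ++ " " ++ y ++ " " ++ z) :: triOf (y :: z :: rest)
  | _ => []

@[simp] lemma biOf_nil : biOf [] = [] := rfl
@[simp] lemma biOf_one (x : String) : biOf [x] = [] := rfl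
@[simp] lemma biOf_cons₂ (x y : String) (rest : List String) :
    biOf (x :: y :: rest) = (x ++ " " ++ y) :: biOf (y :: rest) := rfl
@[simp] lemma triOf_nil : triOf [] = [] := rfl
@[simp] lemma triOf_one (x : String) : triOf [x] = [] := rfl
@[simp] lemma triOf_two (x y : String) : triOf [x, y] = [] := rfl
@[simp] lemma triOf_cons₃ (x y z : String) (rest : List String) :
    triOf (x :: y :: z :: rest) = (x ++ " " ++ y ++ " " ++ z) :: triOf (y :: z :: rest) := rfl

lemma bi_eq (l : List String) :
    (l.zip l.tail).map (fun p => p.1 ++ " " ++ p.2) = biOf l := by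
  induction l with
  | nil => rfl
  | cons x l' ih =>
    cases l' with
    | nil => rfl
    | cons y rest => simpa using ih

lemma tri_eq (l : List String) :
    ((l.zip l.tail).zip (l.drop 2)).map (fun p => p.1.1 ++ " " ++ p.1.2 ++ " " ++ p.2) = triOf l := by
  induction l with
  | nil => rfl
  | cons x l' ih =>
    cases l' with
    | nil => rfl
    | cons y rest =>
      cases rest with
      | nil => rfl
      | cons z rest' => simpa using ih

lemma loopA (ws : List String) (k : Nat) :
    ∀ (a : Nat) (m b t : List String), ws.length ≤ a + k →
    (PySem.List.pyRange (a : Int) (ws.length : Int) 1).foldl (getGramsStep ws (ws.length : Int)) (m, b, t)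
      = (m ++ ws.drop a, b ++ biOf (ws.drop a), t ++ triOf (ws.drop a)) := by
  induction k with
  | zero =>
    intro a m b t h
    rw [PySem.List.pyRange_one_eq_nil (by exact_mod_cast h), List.drop_eq_nil_of_le (by omega : ws.length ≤ a)]
    simp
  | succ k ih =>
    intro a m b t h
    by_cases ha : ws.length ≤ a
    · rw [PySem.List.pyRange_one_eq_nil (by exact_mod_cast ha), List.drop_eq_nil_of_le ha]
      simp
    · replace ha : a < ws.length := by omega
      rw [PySem.List.pyRange_one_cons (by exact_mod_cast ha)]
      have hstep : ((a : Int) + 1) = ((a + 1 : Nat) : Int) := by push_cast; ring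
      have hd : ws.drop a = ws[a] :: ws.drop (a + 1) := List.drop_eq_getElem_cons ha
      have ga : PySem.List.pyGetD ws (a : Int) "" = ws[a] := by
        rw [PySem.List.pyGetD_natCast]; exact List.getD_eq_getElem ws "" ha
      rw [List.foldl_cons]
      by_cases h3 : a + 3 ≤ ws.length
      · have ha1 : a + 1 < ws.length := by omega
        have ha2 : a + 2 < ws.length := by omega
        have hd1 : ws.drop (a + 1) = ws[a+1] :: ws.drop (a + 2) := List.drop_eq_getElem_cons ha1
        have hd2 : ws.drop (a + 2) = ws[a+2] :: ws.drop (a + 3) := List.drop_eq_getElem_cons ha2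
        have ga1 : PySem.List.pyGetD ws ((a : Int) + 1) "" = ws[a+1] := by
          rw [hstep, PySem.List.pyGetD_natCast]; exact List.getD_eq_getElem ws "" ha1
        have ga2 : PySem.List.pyGetD ws ((a : Int) + 2) "" = ws[a+2] := by
          rw [show ((a : Int) + 2) = ((a + 2 : Nat) : Int) by push_cast; ring,
              PySem.List.pyGetD_natCast]
          exact List.getD_eq_getElem ws "" ha2
        have hthis : getGramsStep ws (ws.length : Int) (m, b, t) (a : Int)
            = (m ++ [ws[a]], b ++ [ws[a] ++ " " ++ ws[a+1]],
               t ++ [ws[a] ++ " " ++ ws[a+1] ++ " " ++ ws[a+2]]) := by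
          simp only [getGramsStep, if_pos (show (a : Int) ≤ (ws.length : Int) - 3 by omega),
                     ga, ga1, ga2]
        rw [hthis, hstep, ih (a + 1) _ _ _ (by omega), hd, hd1, hd2]
        simp [-List.getElem_cons_drop]
      · by_cases h2 : a + 2 ≤ ws.length
        · have ha1 : a + 1 < ws.length := by omega
          have hd1 : ws.drop (a + 1) = ws[a+1] :: ws.drop (a + 2) := List.drop_eq_getElem_cons ha1
          have hnil : ws.drop (a + 2) = [] := List.drop_eq_nil_of_le (by omega)
          have ga1 : PySem.List.pyGetD ws ((a : Int) + 1) "" = ws[a+1] := by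
            rw [hstep, PySem.List.pyGetD_natCast]; exact List.getD_eq_getElem ws "" ha1
          have hthis : getGramsStep ws (ws.length : Int) (m, b, t) (a : Int)
              = (m ++ [ws[a]], b ++ [ws[a] ++ " " ++ ws[a+1]], t) := by
            simp only [getGramsStep,
              if_neg (show ¬ ((a : Int) ≤ (ws.length : Int) - 3) by omega),
              if_pos (show (a : Int) ≤ (ws.length : Int) - 2 by omega), ga, ga1]
          rw [hthis, hstep, ih (a + 1) _ _ _ (by omega), hd, hd1, hnil]
          simp [-List.getElem_cons_drop]
        · have hnil : ws.drop (a + 1) = [] := List.drop_eq_nil_of_le (by omega)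
          have hthis : getGramsStep ws (ws.length : Int) (m, b, t) (a : Int)
              = (m ++ [ws[a]], b, t) := by
            simp only [getGramsStep,
              if_neg (show ¬ ((a : Int) ≤ (ws.length : Int) - 3) by omega),
              if_neg (show ¬ ((a : Int) ≤ (ws.length : Int) - 2) by omega),
              if_pos (show (a : Int) = (ws.length : Int) - 1 by omega), ga]
          rw [hthis, hstep, ih (a + 1) _ _ _ (by omega), hd, hnil]
          simp [-List.getElem_cons_drop]

-- ===== VERDICT (by name: the statement is the Claim_ definition above) =====
theorem getGrams_spec : Claim_equal_getGrams := by
  intro text _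
  show getGrams text = getGrams_alt text
  unfold getGrams getGrams_alt
  dsimp only
  have hl := loopA ((PySem.Str.split? text " ").getD []) ((PySem.Str.split? text " ").getD []).length
    0 [] [] [] (by omega)
  simp only [Nat.cast_zero, List.drop_zero, List.nil_append] at hl
  rw [hl,
      PySem.List.slice_from _ (by norm_num : (0:Int) ≤ 1),
      PySem.List.slice_from _ (by norm_num : (0:Int) ≤ 2)]
  simp [bi_eq, tri_eq]
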